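-- pv_equiv track=rewrite | github.com/LeeTaeSung0628/Baekjoon-Programmers | 백준/Gold/16935. 배열 돌리기 3/배열 돌리기 3.py | s_left
-- ===== SOURCE A (Python) =====
-- def slice4(maps):
--     t_maps1 = []
--     t_maps2 = []
--     t_maps3 = []
--     t_maps4 = []
--
--     for i in range(len(maps)//2):
--         temp = []
--         for j in range(len(maps[0])//2):
--             temp.append(maps[i][j])
--         t_maps1.append(temp)
--
--     for i in range(len(maps)//2):
--         temp = []
--         for j in range(len(maps[0])//2,len(maps[0])):
--             temp.append(maps[i][j])
--         t_maps2.append(temp)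
--
--     for i in range(len(maps)//2,len(maps)):
--         temp = []
--         for j in range(len(maps[0])//2,len(maps[0])):
--             temp.append(maps[i][j])
--         t_maps3.append(temp)
--
--     for i in range(len(maps)//2,len(maps)):
--         temp = []
--         for j in range(len(maps[0])//2):
--             temp.append(maps[i][j])
--         t_maps4.append(temp)
--
--     return([t_maps1,t_maps2,t_maps3,t_maps4])
--
-- def s_left(maps):
--     m1,m2,m3,m4 = slice4(maps)
--     t_maps = []
--
--     for i in range(len(maps)//2):
--         t_maps.append(m2[i]+m3[i])
--
--     for i in range(len(maps)//2):
--         t_maps.append(m1[i]+m4[i])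
--
--     return t_maps
-- ===== SOURCE B (Python) =====
-- def s_left(maps):
--     if not maps:
--         return []
--     h = len(maps) // 2
--     W = len(maps[0])
--     w = W // 2
--     res = [maps[i][w:W] + maps[i + h][w:W] for i in range(h)]
--     res += [maps[i][:w] + maps[i + h][:w] for i in range(h)]
--     return res
-- ===== Notes on version B (the rewrite author's own statement) =====
-- stated objective: simpler
-- what changed: B drops the slice4 helper and its four intermediate quadrant matrices built by eight nested element-by-element index loops, and instead builds the result directly with two comprehensions over row slices (maps[i][w:W]+maps[i+h][w:W], then maps[i][:w]+maps[i+h][:w]); C-level slicing replaces per-element appends, a constant-factor win.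
import Mathlib
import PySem

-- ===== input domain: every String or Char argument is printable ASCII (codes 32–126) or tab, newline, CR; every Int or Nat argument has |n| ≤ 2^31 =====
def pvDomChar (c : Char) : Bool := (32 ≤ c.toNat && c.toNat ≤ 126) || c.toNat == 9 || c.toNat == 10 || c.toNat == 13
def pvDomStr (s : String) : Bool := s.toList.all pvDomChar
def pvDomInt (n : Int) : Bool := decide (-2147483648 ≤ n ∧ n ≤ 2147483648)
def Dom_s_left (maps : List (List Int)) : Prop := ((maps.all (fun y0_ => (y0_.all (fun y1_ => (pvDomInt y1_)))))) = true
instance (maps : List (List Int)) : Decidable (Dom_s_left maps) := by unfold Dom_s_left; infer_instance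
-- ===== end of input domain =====

-- ===== PORT A =====
-- literal port of slice4: four nested index loops building the four quadrants
def slice4 (maps : List (List Int)) :
    List (List Int) × List (List Int) × List (List Int) × List (List Int) :=
  let L : Int := (maps.length : Int)
  let W : Int := ((maps.headD []).length : Int)   -- len(maps[0]); loop bodies only read it when rows exist
  let t1 := (PySem.List.pyRange 0 (L / 2) 1).foldl (fun acc i =>
      acc ++ [(PySem.List.pyRange 0 (W / 2) 1).foldl (fun temp j =>
        temp ++ [PySem.List.pyGetD (PySem.List.pyGetD maps i []) j 0]) []]) []
  let t2 := (PySem.List.pyRange 0 (L / 2) 1).foldl (fun acc i =>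
      acc ++ [(PySem.List.pyRange (W / 2) W 1).foldl (fun temp j =>
        temp ++ [PySem.List.pyGetD (PySem.List.pyGetD maps i []) j 0]) []]) []
  let t3 := (PySem.List.pyRange (L / 2) L 1).foldl (fun acc i =>
      acc ++ [(PySem.List.pyRange (W / 2) W 1).foldl (fun temp j =>
        temp ++ [PySem.List.pyGetD (PySem.List.pyGetD maps i []) j 0]) []]) []
  let t4 := (PySem.List.pyRange (L / 2) L 1).foldl (fun acc i =>
      acc ++ [(PySem.List.pyRange 0 (W / 2) 1).foldl (fun temp j =>
        temp ++ [PySem.List.pyGetD (PySem.List.pyGetD maps i []) j 0]) []]) []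
  (t1, t2, t3, t4)

def s_left (maps : List (List Int)) : List (List Int) :=
  let q := slice4 maps
  let m1 := q.1
  let m2 := q.2.1
  let m3 := q.2.2.1
  let m4 := q.2.2.2
  let t := (PySem.List.pyRange 0 ((maps.length : Int) / 2) 1).foldl (fun acc i =>
      acc ++ [PySem.List.pyGetD m2 i [] ++ PySem.List.pyGetD m3 i []]) []
  (PySem.List.pyRange 0 ((maps.length : Int) / 2) 1).foldl (fun acc i =>
      acc ++ [PySem.List.pyGetD m1 i [] ++ PySem.List.pyGetD m4 i []]) t

-- ===== PORT B =====
-- B: no intermediate quadrants; two comprehensions over row slices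
def s_left_alt (maps : List (List Int)) : List (List Int) :=
  if maps = [] then []
  else
    let h : Int := (maps.length : Int) / 2
    let W : Int := ((maps.headD []).length : Int)
    let w : Int := W / 2
    ((PySem.List.pyRange 0 h 1).map (fun i =>
        PySem.List.slice (PySem.List.pyGetD maps i []) (some w) (some W) ++
        PySem.List.slice (PySem.List.pyGetD maps (i + h) []) (some w) (some W)))
    ++ ((PySem.List.pyRange 0 h 1).map (fun i =>
        PySem.List.slice (PySem.List.pyGetD maps i []) none (some w) ++
        PySem.List.slice (PySem.List.pyGetD maps (i + h) []) none (some w)))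

-- ===== PRECONDITION & SPEC =====
-- Pre_ excludes exactly the ragged inputs where some row is shorter than the first row:
-- there A's inner loops index past that row's end and raise IndexError (no value is returned).
def Pre_s_left (maps : List (List Int)) : Prop :=
  ∀ row ∈ maps, (maps.headD []).length ≤ row.length
instance (maps : List (List Int)) : Decidable (Pre_s_left maps) := by
  unfold Pre_s_left; infer_instance

def pvWitness_s_left : List (List Int) := [[1, 2], [3, 4]]

def Spec_s_left (maps : List (List Int)) (out : List (List Int)) : Prop := out = s_left_alt maps
instance (maps : List (List Int)) (out : List (List Int)) : Decidable (Spec_s_left maps out) := by unfold Spec_s_left; infer_instance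

-- ===== CLAIM (what is proved, stated in full; the proofs are below) =====
def Claim_equal_s_left : Prop := ∀ (maps : List (List Int)), Dom_s_left maps → Pre_s_left maps → Spec_s_left maps (s_left maps)

-- ===== LEMMAS AND PROOFS =====

-- reading out a range-map list at an in-range Int index
theorem pyGetD_map_pyRange_one_int {α : Type} (f : Int → α) (a b i : Int) (d : α)
    (h0 : 0 ≤ i) (h1 : i < b - a) :
    PySem.List.pyGetD ((PySem.List.pyRange a b 1).map f) i d = f (a + i) := by
  rw [PySem.List.pyRange_one, List.map_map,
      PySem.List.pyGetD_eq_getElem _ d h0 (by simp; omega)]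
  simp only [List.getElem_map, List.getElem_range, Function.comp]
  congr 1
  omega

-- a map of raw index reads over a subrange is the corresponding drop/take
theorem map_pyGetD_pyRange_take (xs : List Int) (a b : Int)
    (ha : 0 ≤ a) (hb : b ≤ (xs.length : Int)) :
    (PySem.List.pyRange a b 1).map (fun j => PySem.List.pyGetD xs j 0) =
      (xs.drop a.toNat).take (b.toNat - a.toNat) := by
  by_cases hab : b ≤ a
  · rw [PySem.List.pyRange_one_eq_nil hab]
    have : b.toNat - a.toNat = 0 := by omega
    simp [this]
  · push Not at hab
    -- induction on the length of the range
    have key : ∀ n : ℕ, ∀ a : Int, 0 ≤ a → (b - a).toNat = n →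
        (PySem.List.pyRange a b 1).map (fun j => PySem.List.pyGetD xs j 0) =
          (xs.drop a.toNat).take (b.toNat - a.toNat) := by
      intro n
      induction n with
      | zero =>
          intro a ha hn
          rw [PySem.List.pyRange_one_eq_nil (by omega)]
          have : b.toNat - a.toNat = 0 := by omega
          simp [this]
      | succ n ih =>
          intro a ha hn
          have hlt : a < b := by omega
          rw [PySem.List.pyRange_one_cons hlt]
          have haLen : a.toNat < xs.length := by omega
          rw [List.map_cons, ih (a + 1) (by omega) (by omega)]
          rw [PySem.List.pyGetD_eq_getElem _ 0 ha (by exact_mod_cast (by omega : a < (xs.length : Int)))]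
          have hdrop : xs.drop a.toNat = xs[a.toNat] :: xs.drop (a.toNat + 1) :=
            List.drop_eq_getElem_cons haLen
          have ht : b.toNat - a.toNat = (b.toNat - (a + 1).toNat) + 1 := by omega
          have ha1 : (a + 1).toNat = a.toNat + 1 := by omega
          rw [hdrop, ht, List.take_succ_cons, ha1]
    exact key (b - a).toNat a ha rfl

theorem s_left_spec_aux (maps : List (List Int)) (hpre : Pre_s_left maps) :
    s_left maps = s_left_alt maps := by
  by_cases hnil : maps = []
  · subst hnil; rfl
  · unfold s_left slice4 s_left_alt
    simp only [if_neg hnil]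
    set L : Int := (maps.length : Int) with hL
    set W : Int := ((maps.headD []).length : Int) with hW
    have hLpos : 0 < maps.length := List.length_pos_iff.mpr hnil
    have hrowlen : ∀ i : Int, 0 ≤ i → i < L →
        W ≤ ((PySem.List.pyGetD maps i []).length : Int) := by
      intro i h0 h1
      have hmem : PySem.List.pyGetD maps i [] ∈ maps := by
        apply PySem.List.pyGetD_mem
        exact ⟨by omega, by omega⟩
      have := hpre _ hmem
      simp only [hW]
      exact_mod_cast this
    -- rewrite all foldl-append loops of A as maps
    simp only [PySem.List.foldl_append_singleton_eq_map, List.nil_append]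
    congr 1
    · -- the right-half rows: m2[i] ++ m3[i] = maps[i][w:W] ++ maps[i+h][w:W]
      apply List.map_congr_left
      intro i hi
      rw [PySem.List.mem_pyRange_one] at hi
      obtain ⟨h0, h1⟩ := hi
      rw [pyGetD_map_pyRange_one_int _ _ _ _ _ h0 (by omega),
          pyGetD_map_pyRange_one_int _ _ _ _ _ h0 (by omega)]
      have hi2 : 0 ≤ L / 2 + i ∧ L / 2 + i < L := by omega
      simp only [zero_add]
      rw [map_pyGetD_pyRange_take _ _ _ (by omega) (hrowlen i h0 (by omega)),
          map_pyGetD_pyRange_take _ _ _ (by omega) (by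
            have := hrowlen (L / 2 + i) hi2.1 hi2.2
            omega),
          PySem.List.slice_toNat _ (by omega) (by omega),
          PySem.List.slice_toNat _ (by omega) (by omega),
          show L / 2 + i = i + L / 2 by ring]
    · -- the left-half rows: m1[i] ++ m4[i] = maps[i][:w] ++ maps[i+h][:w]
      apply List.map_congr_left
      intro i hi
      rw [PySem.List.mem_pyRange_one] at hi
      obtain ⟨h0, h1⟩ := hi
      rw [pyGetD_map_pyRange_one_int _ _ _ _ _ h0 (by omega),
          pyGetD_map_pyRange_one_int _ _ _ _ _ h0 (by omega)]
      have hi2 : 0 ≤ L / 2 + i ∧ L / 2 + i < L := by omega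
      simp only [zero_add]
      rw [map_pyGetD_pyRange_take _ _ _ (by omega) (by
            have := hrowlen i h0 (by omega)
            omega),
          map_pyGetD_pyRange_take _ _ _ (by omega) (by
            have := hrowlen (L / 2 + i) hi2.1 hi2.2
            omega),
          PySem.List.slice_to _ (by omega),
          PySem.List.slice_to _ (by omega),
          show L / 2 + i = i + L / 2 by ring]
      simp

-- ===== VERDICT (by name: the statement is the Claim_ definition above) =====
theorem s_left_spec : Claim_equal_s_left := by
  intro maps _ hpre
  unfold Spec_s_left
  exact s_left_spec_aux maps hpre
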